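-- pv_equiv track=rewrite | github.com/chengdagong/ue5-dev-tools | ue5-dev-tools/skills/api-validator/scripts/convert_stub_to_mock.py | get_mock_return_value
-- ===== SOURCE A (Python) =====
-- def get_mock_return_value(return_type: str) -> str:
--     """Generate mock return value based on return type"""
--     if not return_type or return_type == "None":
--         return "None"
--
--     # Clean type annotation
--     return_type = return_type.strip()
--
--     # Handle Optional types
--     if return_type.startswith("Optional["):
--         return "None"
--
--     # Basic types
--     type_map = {
--         "bool": "False",
--         "int": "0",
--         "float": "0.0",
--         "str": '""',
--         "bytes": 'b""',
--         "list": "[]",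
--         "dict": "{}",
--         "set": "set()",
--         "tuple": "()",
--         "List": "[]",
--         "Dict": "{}",
--         "Set": "set()",
--         "Tuple": "()",
--         "Any": "None",
--         "object": "None",
--         "Iterator": "iter([])",
--         "Iterable": "[]",
--     }
--
--     # Direct match
--     if return_type in type_map:
--         return type_map[return_type]
--
--     # Handle generic types
--     for key in type_map:
--         if return_type.startswith(f"{key}["):
--             return type_map[key]
--
--     # Unreal-specific types
--     if return_type in ("Name", "Text"):
--         return f'{return_type}("")' if return_type != "Name" else 'Name("None")'
--
--     # Array types
--     if return_type.startswith("Array["):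
--         return "Array(object)"
--
--     # Other types return None
--     return "None"
-- ===== SOURCE B (Python) =====
-- def get_mock_return_value(return_type: str) -> str:
--     """Generate mock return value based on return type"""
--     # Data-driven rule table: one ordered scan over (pattern, kind, value) rules
--     # replaces A's guard chain + dict membership + separate prefix loop.
--     EXACT, PREFIX, BASE = 0, 1, 2
--     rules = [
--         ("None", EXACT, "None"),
--         ("Optional[", PREFIX, "None"),
--         ("bool", BASE, "False"),
--         ("int", BASE, "0"),
--         ("float", BASE, "0.0"),
--         ("str", BASE, '""'),
--         ("bytes", BASE, 'b""'),
--         ("list", BASE, "[]"),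
--         ("dict", BASE, "{}"),
--         ("set", BASE, "set()"),
--         ("tuple", BASE, "()"),
--         ("List", BASE, "[]"),
--         ("Dict", BASE, "{}"),
--         ("Set", BASE, "set()"),
--         ("Tuple", BASE, "()"),
--         ("Any", BASE, "None"),
--         ("object", BASE, "None"),
--         ("Iterator", BASE, "iter([])"),
--         ("Iterable", BASE, "[]"),
--         ("Name", EXACT, 'Name("None")'),
--         ("Text", EXACT, 'Text("")'),
--         ("Array[", PREFIX, "Array(object)"),
--     ]
--     t = return_type.strip()
--     for pattern, kind, value in rules:
--         if kind == EXACT: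
--             matched = t == pattern
--         elif kind == PREFIX:
--             matched = t.startswith(pattern)
--         else:  # BASE: bare type name, or generic written 'name[...]'
--             matched = t == pattern or t.startswith(pattern + "[")
--         if matched:
--             return value
--     return "None"
-- ===== Notes on version B (the rewrite author's own statement) =====
-- stated objective: alternative
-- what changed: A is a guard chain with a dict membership test plus a separate startswith loop over the dict keys; B is a data-driven rule interpreter: one ordered table of (pattern, kind, value) rules with three matcher kinds (exact, prefix, base-or-generic) scanned once, first match wins, so the empty/None/Optional/Name/Text/Array guards and the dict become rows of the same table.
import Mathlib
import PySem

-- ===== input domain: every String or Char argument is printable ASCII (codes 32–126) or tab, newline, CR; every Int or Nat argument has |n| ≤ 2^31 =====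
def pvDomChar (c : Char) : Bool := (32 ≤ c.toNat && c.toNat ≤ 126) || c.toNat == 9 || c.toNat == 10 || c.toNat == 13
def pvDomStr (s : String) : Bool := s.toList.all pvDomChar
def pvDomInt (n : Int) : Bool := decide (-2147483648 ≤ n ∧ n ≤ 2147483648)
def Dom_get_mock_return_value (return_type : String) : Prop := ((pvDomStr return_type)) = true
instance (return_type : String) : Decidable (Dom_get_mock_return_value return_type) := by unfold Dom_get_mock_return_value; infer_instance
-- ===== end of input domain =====

-- B replaces A's guard chain + dict + separate startswith key loop by a single ordered
-- rule table (pattern, matcher kind, value) scanned once, first match wins; objective: alternative.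

-- ===== PORT A =====
-- the type_map dict literal A contains
def pvTypeMap : PySem.Dict String String := PySem.Dict.ofList
  [("bool", "False"), ("int", "0"), ("float", "0.0"), ("str", "\"\""), ("bytes", "b\"\""),
   ("list", "[]"), ("dict", "{}"), ("set", "set()"), ("tuple", "()"), ("List", "[]"),
   ("Dict", "{}"), ("Set", "set()"), ("Tuple", "()"), ("Any", "None"), ("object", "None"),
   ("Iterator", "iter([])"), ("Iterable", "[]")]

-- A's "for key in type_map: if return_type.startswith(f'{key}['): return type_map[key]"
def pvGenericLoop : List String → String → Option String
  | [], _ => none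
  | k :: rest, s =>
      if PySem.Str.startswith s (k ++ "[") then some (pvTypeMap.getD k "")
      else pvGenericLoop rest s

def get_mock_return_value (return_type : String) : String :=
  if return_type = "" ∨ return_type = "None" then "None"
  else
    let t := PySem.Str.strip return_type
    if PySem.Str.startswith t "Optional[" then "None"
    else if pvTypeMap.contains t then pvTypeMap.getD t ""
    else
      match pvGenericLoop pvTypeMap.keys t with
      | some v => v
      | none =>
        if t = "Name" ∨ t = "Text" then
          (if t ≠ "Name" then t ++ "(\"\")" else "Name(\"None\")")
        else if PySem.Str.startswith t "Array[" then "Array(object)"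
        else "None"

-- ===== PORT B =====
-- B's ordered rule table: kind 0 = EXACT, 1 = PREFIX, 2 = BASE (bare name or 'name[...]')
def pvRules : List (String × Nat × String) :=
  [("None", 0, "None"), ("Optional[", 1, "None"),
   ("bool", 2, "False"), ("int", 2, "0"), ("float", 2, "0.0"), ("str", 2, "\"\""),
   ("bytes", 2, "b\"\""), ("list", 2, "[]"), ("dict", 2, "{}"), ("set", 2, "set()"),
   ("tuple", 2, "()"), ("List", 2, "[]"), ("Dict", 2, "{}"), ("Set", 2, "set()"),
   ("Tuple", 2, "()"), ("Any", 2, "None"), ("object", 2, "None"),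
   ("Iterator", 2, "iter([])"), ("Iterable", 2, "[]"),
   ("Name", 0, "Name(\"None\")"), ("Text", 0, "Text(\"\")"), ("Array[", 1, "Array(object)")]

def pvMatch (t pat : String) (kind : Nat) : Bool :=
  match kind with
  | 0 => t == pat
  | 1 => PySem.Str.startswith t pat
  | _ => t == pat || PySem.Str.startswith t (pat ++ "[")

-- B's "for pattern, kind, value in rules: …" with default "None"
def pvApplyRules : List (String × Nat × String) → String → String
  | [], _ => "None"
  | (pat, kind, val) :: rest, t => if pvMatch t pat kind then val else pvApplyRules rest t

def get_mock_return_value_alt (return_type : String) : String :=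
  pvApplyRules pvRules (PySem.Str.strip return_type)

-- ===== PRECONDITION & SPEC =====
def Spec_get_mock_return_value (return_type : String) (out : String) : Prop := out = get_mock_return_value_alt return_type
instance (return_type : String) (out : String) : Decidable (Spec_get_mock_return_value return_type out) := by unfold Spec_get_mock_return_value; infer_instance

-- ===== CLAIM (what is proved, stated in full; the proofs are below) =====
def Claim_equal_get_mock_return_value : Prop := ∀ (return_type : String), Dom_get_mock_return_value return_type → Spec_get_mock_return_value return_type (get_mock_return_value return_type)

-- ===== LEMMAS AND PROOFS =====

lemma pv_startswith_bracket_false (cs kl : List Char) (h : '[' ∉ cs) :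
    PySem.Chars.startswith cs (kl ++ ['[']) = false := by
  cases hb : PySem.Chars.startswith cs (kl ++ ['[']) with
  | false => rfl
  | true =>
    exact absurd ((PySem.Chars.startswith_iff _ _).1 hb).subset
      (by intro hs; exact h (hs (by simp)))

-- a string containing '[' is not equal to a bracket-free literal
lemma pv_ne_of_bracket (t pat : String) (h : '[' ∈ t.toList) (hp : '[' ∉ pat.toList) :
    (t == pat) = false := by
  simp only [beq_eq_false_iff_ne, ne_eq]
  rintro rfl; exact hp h

lemma pv_sw_bracket_false (t : String) (k : String) (h : '[' ∉ t.toList) :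
    PySem.Str.startswith t (k ++ "[") = false := by
  rw [PySem.Str.startswith_eq, String.toList_append,
      show ("[" : String).toList = ['['] from rfl]
  exact pv_startswith_bracket_false _ _ h

-- B's BASE-rule segment over A's dict keys behaves like A's startswith loop
-- when t equals none of the keys
lemma pv_seg (t : String) (ks : List String) (tail : List (String × Nat × String))
    (hk : ∀ k ∈ ks, (t == k) = false) :
    pvApplyRules (ks.map (fun k => (k, 2, pvTypeMap.getD k "")) ++ tail) t
      = match pvGenericLoop ks t with
        | some v => v
        | none => pvApplyRules tail t := by
  induction ks with
  | nil => rfl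
  | cons k rest ih =>
    simp only [List.map_cons, List.cons_append, pvApplyRules, pvMatch, pvGenericLoop,
      hk k (by simp), Bool.false_or]
    by_cases h : PySem.Chars.startswith t.toList (k.toList ++ ['[']) = true <;>
      simp [h, ih (fun k' hm => hk k' (by simp [hm]))]

lemma pv_keys : pvTypeMap.keys = ["bool", "int", "float", "str", "bytes", "list", "dict", "set", "tuple", "List", "Dict", "Set", "Tuple", "Any", "object", "Iterator", "Iterable"] := by decide

lemma pv_rules_split : pvRules =
    ("None", 0, "None") :: ("Optional[", 1, "None") ::
      (pvTypeMap.keys.map (fun k => (k, 2, pvTypeMap.getD k "")) ++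
        [("Name", 0, "Name(\"None\")"), ("Text", 0, "Text(\"\")"), ("Array[", 1, "Array(object)")]) := by
  decide

-- ===== VERDICT (by name: the statement is the Claim_ definition above) =====
set_option maxHeartbeats 1000000 in
theorem get_mock_return_value_spec : Claim_equal_get_mock_return_value := by
  unfold Claim_equal_get_mock_return_value Spec_get_mock_return_value
  intro s _
  unfold get_mock_return_value get_mock_return_value_alt
  by_cases h0 : s = "" ∨ s = "None"
  · rcases h0 with rfl | rfl <;> decide
  · simp only [h0, if_false]
    generalize PySem.Str.strip s = t
    rw [pv_rules_split]
    by_cases hbr : '[' ∈ t.toList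
    · -- t contains '[': no exact test can fire on either side
      have hget : pvTypeMap.get? t = none := by
        rw [PySem.Dict.get?_eq_none_iff_not_mem_keys, pv_keys]
        intro hk
        simp only [List.mem_cons, List.not_mem_nil, or_false] at hk
        rcases hk with rfl|rfl|rfl|rfl|rfl|rfl|rfl|rfl|rfl|rfl|rfl|rfl|rfl|rfl|rfl|rfl|rfl <;> exact absurd hbr (by decide)
      have hcont : pvTypeMap.contains t = false := by
        rw [PySem.Dict.contains_eq_isSome_get?, hget]; rfl
      have hseg := pv_seg t pvTypeMap.keys
        [("Name", 0, "Name(\"None\")"), ("Text", 0, "Text(\"\")"), ("Array[", 1, "Array(object)")]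
        (by rw [pv_keys]; intro k hk
            simp only [List.mem_cons, List.not_mem_nil, or_false] at hk
            rcases hk with rfl|rfl|rfl|rfl|rfl|rfl|rfl|rfl|rfl|rfl|rfl|rfl|rfl|rfl|rfl|rfl|rfl <;>
              exact pv_ne_of_bracket t _ hbr (by decide))
      have hne : ∀ pat : String, '[' ∉ pat.toList → (t = pat) = False := by
        intro pat hp
        simp only [eq_iff_iff, iff_false]; rintro rfl; exact hp hbr
      simp only [pvApplyRules, pvMatch,
        pv_ne_of_bracket t "None" hbr (by decide), Bool.false_eq_true, if_false, hseg,
        hcont, hne "Name" (by decide), hne "Text" (by decide), or_self,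
        pv_ne_of_bracket t "Name" hbr (by decide), pv_ne_of_bracket t "Text" hbr (by decide)]
    · -- t has no '[': every prefix test fails on both sides
      have hloop : ∀ ks : List String, pvGenericLoop ks t = none := by
        intro ks; induction ks with
        | nil => rfl
        | cons k rest ih =>
          simp only [pvGenericLoop, pv_sw_bracket_false t k hbr, Bool.false_eq_true, if_false, ih]
      have hOpt : PySem.Str.startswith t "Optional[" = false :=
        pv_sw_bracket_false t "Optional" hbr
      have hArr : PySem.Str.startswith t "Array[" = false :=
        pv_sw_bracket_false t "Array" hbr
      cases hget : pvTypeMap.get? t with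
      | some v =>
        have hk : t ∈ pvTypeMap.keys := by
          by_contra hnk
          rw [(PySem.Dict.get?_eq_none_iff_not_mem_keys pvTypeMap t).2 hnk] at hget
          cases hget
        rw [pv_keys] at hk
        simp only [List.mem_cons, List.not_mem_nil, or_false] at hk
        rcases hk with rfl|rfl|rfl|rfl|rfl|rfl|rfl|rfl|rfl|rfl|rfl|rfl|rfl|rfl|rfl|rfl|rfl <;>
          rw [← pv_rules_split] <;> decide
      | none =>
        have hcont : pvTypeMap.contains t = false := by
          rw [PySem.Dict.contains_eq_isSome_get?, hget]; rfl
        have hnk : t ∉ pvTypeMap.keys :=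
          (PySem.Dict.get?_eq_none_iff_not_mem_keys pvTypeMap t).1 hget
        rw [pv_keys] at hnk
        simp only [List.mem_cons, List.not_mem_nil, or_false, not_or] at hnk
        obtain ⟨n1,n2,n3,n4,n5,n6,n7,n8,n9,n10,n11,n12,n13,n14,n15,n16,n17⟩ := hnk
        by_cases hN : t = "None"
        · subst hN; rw [← pv_rules_split]; decide
        · by_cases hNa : t = "Name"
          · subst hNa; rw [← pv_rules_split]; decide
          · by_cases hTx : t = "Text"
            · subst hTx; rw [← pv_rules_split]; decide
            · have hseg := pv_seg t pvTypeMap.keys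
                [("Name", 0, "Name(\"None\")"), ("Text", 0, "Text(\"\")"), ("Array[", 1, "Array(object)")]
                (by rw [pv_keys]; intro k hk
                    simp only [List.mem_cons, List.not_mem_nil, or_false] at hk
                    rcases hk with rfl|rfl|rfl|rfl|rfl|rfl|rfl|rfl|rfl|rfl|rfl|rfl|rfl|rfl|rfl|rfl|rfl <;>
                      simp_all)
              simp only [pvApplyRules, pvMatch, hseg, hloop, hOpt, hArr, hcont,
                Bool.false_eq_true, if_false, beq_iff_eq, hN, hNa, hTx, or_self]
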